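-- pv_equiv track=rewrite | github.com/florian-juniat/Math | 305construction.py | total
-- ===== SOURCE A (Python) =====
-- tab = [];
--
-- def total(name, tab):
--     index = -1
--     for i in range(len(tab)):
--         if (tab[i][0] == name):
--             index = i
--     if (index == -1):
--         return (-1)
--     if (len(tab[index][2]) == 0):
--         return (int(tab[index][1]))
--     ret = []
--     for i in range(len(tab[index][2])):
--         ret.append(total(tab[index][2][i], tab))
--     max = -1
--     for i in range(len(ret)):
--         if (ret[i] > max):
--             max = ret[i]
--     return (max + int(tab[index][1]))
-- ===== SOURCE B (Python) =====
-- def total(name, tab):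
--     # build the name -> (cost, deps) index once (last occurrence wins, as in A's scan),
--     # then evaluate with memoized recursion so shared dependencies are computed once
--     index = {}
--     for n, c, deps in tab:
--         index[n] = (c, deps)
--     memo = {}
--     def cost(n):
--         if n not in index:
--             return -1
--         if n in memo:
--             return memo[n]
--         c, deps = index[n]
--         if not deps:
--             v = int(c)
--         else:
--             best = -1
--             for d in deps:
--                 best = max(best, cost(d))
--             v = best + int(c)
--         memo[n] = v
--         return v
--     return cost(name)
-- ===== Notes on version B (the rewrite author's own statement) =====
-- stated objective: alternative
-- what changed: A's memoryless recursion, which rescans the whole table linearly on every call and recomputes shared dependencies repeatedly, is replaced by a dict index built once plus memoized recursion, so each name is resolved at most once.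
import Mathlib
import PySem

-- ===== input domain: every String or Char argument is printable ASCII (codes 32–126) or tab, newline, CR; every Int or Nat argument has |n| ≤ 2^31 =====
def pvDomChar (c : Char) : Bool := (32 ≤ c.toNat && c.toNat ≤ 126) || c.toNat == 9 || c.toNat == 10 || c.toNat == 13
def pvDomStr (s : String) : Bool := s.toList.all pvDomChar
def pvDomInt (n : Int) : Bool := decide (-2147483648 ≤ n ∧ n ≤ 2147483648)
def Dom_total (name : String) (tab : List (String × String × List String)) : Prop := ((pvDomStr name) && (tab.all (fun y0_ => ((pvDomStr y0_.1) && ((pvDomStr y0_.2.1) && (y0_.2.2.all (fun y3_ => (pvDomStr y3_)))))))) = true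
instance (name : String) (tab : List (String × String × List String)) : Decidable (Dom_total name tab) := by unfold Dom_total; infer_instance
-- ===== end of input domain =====

-- B builds the name -> (cost, deps) index once and evaluates with memoized recursion,
-- instead of A's memoryless recursion that rescans the whole table on every call.

abbrev PvE := String × String × List String

-- ===== PORT A =====
-- A's first loop: for i in range(len(tab)): if tab[i][0] == name: index = i   (carries (i, index))
def pvScan (name : String) (tab : List PvE) : Int × Int :=
  tab.foldl (fun p e => (p.1 + 1, if e.1 = name then p.1 else p.2)) ((0 : Int), (-1 : Int))

-- A's recursion, with a fuel argument as a totality device only: under Pre_total the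
-- recursion depth never exceeds tab.length + 1, so the 0 case is unreachable there
-- (on an input with a cycle reachable from name the Python recurses without bound — excluded by Pre_total).
def totalF (tab : List PvE) : Nat → String → Int
  | 0, _ => -1
  | fuel + 1, name =>
    let index : Int := (pvScan name tab).2
    if index = -1 then -1
    else
      match PySem.List.pyGet? tab index with
      | none => -1   -- unreachable: a found index is always in range
      | some e =>
        if e.2.2.length = 0 then (PySem.Int.ofStr? e.2.1).getD 0  -- int(); ValueError excluded by Pre_total
        else
          let ret := e.2.2.foldl (fun acc d => acc ++ [totalF tab fuel d]) []
          let mx := ret.foldl (fun m x => if x > m then x else m) (-1)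
          mx + (PySem.Int.ofStr? e.2.1).getD 0

def total (name : String) (tab : List PvE) : Int :=
  totalF tab (tab.length + 1) name

-- ===== PORT B =====
-- index = {} ; for n, c, deps in tab: index[n] = (c, deps)   (last occurrence wins, as in A's scan)
def pvIdx (tab : List PvE) : PySem.Dict String (String × List String) :=
  tab.foldl (fun d e => d.insert e.1 e.2) PySem.Dict.empty

-- B's inner function `cost` (and its `for d in deps` loop), threading the memo dict;
-- fuel is a totality device only: under Pre_total the recursion depth is at most
-- tab.length, so with fuel tab.length + 1 the 0 case is never reached there
mutual
def pvCost (idx : PySem.Dict String (String × List String)) :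
    Nat → String → PySem.Dict String Int → Int × PySem.Dict String Int
  | 0, _, memo => (-1, memo)
  | fuel + 1, n, memo =>
    match idx.get? n with
    | none => (-1, memo)
    | some cd =>
      match memo.get? n with
      | some v => (v, memo)
      | none =>
        if cd.2 = [] then
          let v := (PySem.Int.ofStr? cd.1).getD 0   -- int(c); ValueError excluded by Pre_total
          (v, memo.insert n v)
        else
          let p := pvDeps idx fuel cd.2 (-1) memo
          let v := p.1 + (PySem.Int.ofStr? cd.1).getD 0
          (v, p.2.insert n v)
termination_by fuel _ _ => (fuel, 0)
decreasing_by all_goals · simp_wf; omega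

def pvDeps (idx : PySem.Dict String (String × List String)) :
    Nat → List String → Int → PySem.Dict String Int → Int × PySem.Dict String Int
  | _, [], best, memo => (best, memo)
  | fuel, d :: ds, best, memo =>
    let q := pvCost idx fuel d memo
    pvDeps idx fuel ds (max best q.1) q.2
termination_by fuel l _ _ => (fuel, l.length + 1)
decreasing_by all_goals · simp_wf; omega
end

def total_alt (name : String) (tab : List PvE) : Int :=
  (pvCost (pvIdx tab) (tab.length + 1) name PySem.Dict.empty).1

-- ===== PRECONDITION & SPEC =====
-- one resolution step: an entry stays as long as its cost string is not int()-parseable or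
-- some dependency of it is still unresolved
def pvQPeel (l : List PvE) : List PvE :=
  l.filter (fun e => (PySem.Int.ofStr? e.2.1).isNone || e.2.2.any (fun d => l.any (fun e' => e'.1 = d)))

-- Pre_total excludes exactly the inputs on which the Python A raises: a dependency cycle
-- reachable from name (unbounded recursion) or an entry reachable from name whose cost
-- string int() rejects (ValueError); equivalently, name's entry never resolves under
-- iterated peeling (a missing name resolves trivially: A returns -1 there).
def Pre_total (name : String) (tab : List (String × String × List String)) : Prop :=
  name ∉ (pvQPeel^[tab.length] (pvIdx tab).items).map (fun e => e.1)
instance (name : String) (tab : List (String × String × List String)) : Decidable (Pre_total name tab) := by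
  unfold Pre_total; infer_instance

def pvWitness_total : String × (List (String × String × List String)) :=
  ("a", [("b", "2", []), ("a", "10", ["b"])])

def Spec_total (name : String) (tab : List (String × String × List String)) (out : Int) : Prop := out = total_alt name tab
instance (name : String) (tab : List (String × String × List String)) (out : Int) : Decidable (Spec_total name tab out) := by unfold Spec_total; infer_instance

-- ===== CLAIM (what is proved, stated in full; the proofs are below) =====
def Claim_equal_total : Prop := ∀ (name : String) (tab : List (String × String × List String)), Dom_total name tab → Pre_total name tab → Spec_total name tab (total name tab)

-- ===== LEMMAS AND PROOFS =====

-- the peeling sequence and the key list of a stage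
def pvP (tab : List PvE) (k : Nat) : List PvE := pvQPeel^[k] (pvIdx tab).items
def pvKeys (l : List PvE) : List String := l.map (·.1)

-- A's scan finds the last entry named `name`, i.e. the dict lookup of B's index
theorem pvScan_spec (name : String) (tab : List PvE) :
    (pvScan name tab).1 = (tab.length : Int) ∧
    ((if (pvScan name tab).2 = -1 then none else PySem.List.pyGet? tab (pvScan name tab).2)
      = ((pvIdx tab).get? name).map (fun cd => (name, cd))) ∧
    ((pvScan name tab).2 = -1 ∨ (0 ≤ (pvScan name tab).2 ∧ (pvScan name tab).2 < tab.length)) := by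
  induction tab using List.reverseRecOn with
  | nil => simp [pvScan, pvIdx]
  | append_singleton l e ih =>
    obtain ⟨ih1, ih2, ih3⟩ := ih
    simp only [pvScan, pvIdx, List.foldl_append, List.foldl_cons, List.foldl_nil] at *
    by_cases hm : e.1 = name
    · refine ⟨?_, ?_, ?_⟩
      · simp [ih1]
      · rw [if_pos hm, ih1]
        have h1 : ((l.length : Int)) ≠ -1 := by omega
        rw [if_neg h1]
        subst hm
        rw [PySem.Dict.get?_insert_self]
        simp
      · right
        rw [if_pos hm, ih1]
        refine ⟨Int.natCast_nonneg _, ?_⟩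
        simp only [List.length_append, List.length_cons, List.length_nil]; push_cast; omega
    · have hne : name ≠ e.1 := fun h => hm h.symm
      refine ⟨?_, ?_, ?_⟩
      · simp [ih1]
      · rw [if_neg hm, PySem.Dict.get?_insert_of_ne _ _ hne]
        rw [← ih2]
        rcases ih3 with h | ⟨h0, hlt⟩
        · simp [h]
        · have h1 : (l.foldl (fun p e => (p.1 + 1, if e.1 = name then p.1 else p.2)) ((0:Int),(-1:Int))).2 ≠ -1 := by omega
          rw [if_neg h1, if_neg h1]
          rw [PySem.List.pyGet?_of_nonneg _ h0, PySem.List.pyGet?_of_nonneg _ h0]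
          rw [List.getElem?_append_left]
          omega
      · rw [if_neg hm]
        rcases ih3 with h | ⟨h0, hlt⟩
        · left; exact h
        · right
          refine ⟨h0, ?_⟩
          simp only [List.length_append, List.length_cons, List.length_nil]; push_cast; omega

-- one unfolding of A's recursion, phrased through the dict lookup
theorem totalF_succ (tab : List PvE) (fuel : Nat) (name : String) :
    totalF tab (fuel + 1) name =
      match (pvIdx tab).get? name with
      | none => -1
      | some cd =>
        if cd.2 = [] then (PySem.Int.ofStr? cd.1).getD 0
        else (cd.2.map (totalF tab fuel)).foldl (fun m x => if x > m then x else m) (-1)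
              + (PySem.Int.ofStr? cd.1).getD 0 := by
  obtain ⟨h1, h2, h3⟩ := pvScan_spec name tab
  cases hg : (pvIdx tab).get? name with
  | none =>
    rw [hg] at h2; simp only [Option.map_none] at h2
    have hscan : (pvScan name tab).2 = -1 := by
      by_contra hne
      rcases h3 with h | ⟨h0, hlt⟩
      · exact hne h
      · rw [if_neg hne] at h2
        rw [PySem.List.pyGet?_eq_none_iff] at h2
        exact h2 ⟨by omega, by omega⟩
    simp [totalF, hscan]
  | some cd =>
    rw [hg] at h2
    have hne : (pvScan name tab).2 ≠ -1 := by
      intro h; rw [if_pos h] at h2; simp at h2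
    rw [if_neg hne] at h2
    simp only [Option.map_some] at h2
    simp only [totalF, if_neg hne, h2]
    by_cases hd : cd.2 = []
    · simp [hd]
    · rw [if_neg (by simpa using hd), if_neg hd]
      rw [PySem.List.foldl_append_singleton_eq_map]
      simp

theorem totalF_succ_some (tab : List PvE) (fuel : Nat) (name : String)
    (cd : String × List String) (h : (pvIdx tab).get? name = some cd) :
    totalF tab (fuel + 1) name =
      if cd.2 = [] then (PySem.Int.ofStr? cd.1).getD 0
      else (cd.2.map (totalF tab fuel)).foldl (fun m x => if x > m then x else m) (-1)
            + (PySem.Int.ofStr? cd.1).getD 0 := by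
  rw [totalF_succ, h]

theorem totalF_none (tab : List PvE) (m : Nat) (name : String)
    (h : (pvIdx tab).get? name = none) : totalF tab m name = -1 := by
  cases m with
  | zero => rfl
  | succ fuel => rw [totalF_succ, h]

theorem pvIdx_keys_nodup (tab : List PvE) : (pvIdx tab).keys.Nodup :=
  PySem.Dict.nodup_keys_foldl_insert_key tab (·.1) (fun _ e => e.2) PySem.Dict.empty
    PySem.Dict.nodup_keys_empty

theorem pvP_sub (tab : List PvE) (k : Nat) : ∀ e, e ∈ pvP tab (k + 1) → e ∈ pvP tab k := by
  intro e he
  rw [pvP, Function.iterate_succ_apply'] at he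
  exact List.mem_of_mem_filter he

theorem pvP_sub_items (tab : List PvE) (k : Nat) : ∀ e, e ∈ pvP tab k → e ∈ pvP tab 0 := by
  induction k with
  | zero => exact fun e he => he
  | succ j ih => exact fun e he => ih e (pvP_sub tab j e he)

theorem pvKeys_mono (tab : List PvE) (k : Nat) (s : String)
    (h : s ∉ pvKeys (pvP tab k)) : s ∉ pvKeys (pvP tab (k + 1)) := by
  intro hmem
  apply h
  rw [pvKeys, List.mem_map] at hmem ⊢
  obtain ⟨e, he, rfl⟩ := hmem
  exact ⟨e, pvP_sub tab k e he, rfl⟩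

theorem pvEntry_unique (tab : List PvE) (e e' : PvE) (he : e ∈ (pvIdx tab).items)
    (he' : e' ∈ (pvIdx tab).items) (hk : e.1 = e'.1) : e = e' := by
  have hnd := pvIdx_keys_nodup tab
  have hkeys : (pvIdx tab).keys = (pvIdx tab).items.map (·.1) := rfl
  rw [hkeys] at hnd
  exact List.inj_on_of_nodup_map hnd he he' hk

theorem pvMem_keys (l : List PvE) (s : String) : s ∈ pvKeys l ↔ ∃ e ∈ l, e.1 = s := by
  simp [pvKeys]

theorem pvP_succ (tab : List PvE) (k : Nat) : pvP tab (k + 1) = pvQPeel (pvP tab k) := by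
  rw [pvP, Function.iterate_succ_apply', pvP]

theorem pvSurvive (l : List PvE) (e : PvE) :
    e ∈ pvQPeel l ↔ e ∈ l ∧ ((PySem.Int.ofStr? e.2.1).isNone ∨ ∃ d ∈ e.2.2, ∃ e' ∈ l, e'.1 = d) := by
  rw [pvQPeel, List.mem_filter]
  simp

-- if a key's entry is gone from stage k+1 but was in the table, its cost parses and
-- all its dependencies are gone from stage k
theorem pvDep_gone (tab : List PvE) (k : Nat) (e : PvE) (he : e ∈ pvP tab 0)
    (h : e.1 ∉ pvKeys (pvP tab (k + 1))) :
    (PySem.Int.ofStr? e.2.1).isSome = true ∧ ∀ d ∈ e.2.2, d ∉ pvKeys (pvP tab k) := by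
  induction k with
  | zero =>
    have hnot1 : e ∉ pvP tab 1 := fun h1 => h ((pvMem_keys _ _).mpr ⟨e, h1, rfl⟩)
    rw [pvP_succ, pvSurvive] at hnot1
    push Not at hnot1
    obtain ⟨h1, h2⟩ := hnot1 he
    refine ⟨?_, ?_⟩
    · cases hx : PySem.Int.ofStr? e.2.1 with
      | none => exact absurd (by simp [hx]) h1
      | some _ => simp
    · intro d hd hmem
      obtain ⟨e', he', hk'⟩ := (pvMem_keys _ _).mp hmem
      exact h2 d hd e' he' hk'
  | succ j ih =>
    by_cases hB : e.1 ∈ pvKeys (pvP tab (j + 1))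
    · obtain ⟨e', he', hk'⟩ := (pvMem_keys _ _).mp hB
      have heq : e' = e := pvEntry_unique tab e' e (pvP_sub_items tab _ e' he') he hk'
      subst heq
      have hnot : e' ∉ pvP tab (j + 2) := fun h2 => h ((pvMem_keys _ _).mpr ⟨e', h2, rfl⟩)
      rw [pvP_succ, pvSurvive] at hnot
      push Not at hnot
      obtain ⟨h1, h2⟩ := hnot he'
      refine ⟨?_, ?_⟩
      · cases hx : PySem.Int.ofStr? e'.2.1 with
        | none => exact absurd (by simp [hx]) h1
        | some _ => simp
      · intro d hd hmem
        obtain ⟨e'', he'', hk''⟩ := (pvMem_keys _ _).mp hmem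
        exact h2 d hd e'' he'' hk''
    · have hprev := ih hB
      exact ⟨hprev.1, fun d hd => pvKeys_mono tab j d (hprev.2 d hd)⟩

theorem pvGet?_none_iff (tab : List PvE) (s : String) :
    (pvIdx tab).get? s = none ↔ s ∉ pvKeys (pvP tab 0) := by
  rw [PySem.Dict.get?_eq_none_iff_not_mem_keys]
  rfl

-- once a name has left the peeling sequence, its totalF value is fuel-stable
theorem pvStable (tab : List PvE) (k : Nat) :
    ∀ (s : String), s ∉ pvKeys (pvP tab k) →
    ∀ f, k ≤ f → totalF tab (f + 1) s = totalF tab f s := by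
  induction k with
  | zero =>
    intro s h f _
    have hg : (pvIdx tab).get? s = none := (pvGet?_none_iff tab s).mpr h
    rw [totalF_none tab _ _ hg, totalF_none tab _ _ hg]
  | succ j ih =>
    intro s h f hf
    obtain ⟨f', rfl⟩ : ∃ f', f = f' + 1 := ⟨f - 1, by omega⟩
    cases hg : (pvIdx tab).get? s with
    | none => rw [totalF_none tab _ _ hg, totalF_none tab _ _ hg]
    | some cd =>
      rw [totalF_succ, totalF_succ, hg]
      by_cases hd : cd.2 = []
      · simp [hd]
      · have he : (s, cd) ∈ pvP tab 0 := PySem.Dict.mem_items_of_get?_eq_some _ hg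
        have hgone := (pvDep_gone tab j (s, cd) he h).2
        have hmap : cd.2.map (totalF tab (f' + 1)) = cd.2.map (totalF tab f') :=
          List.map_congr_left fun d hdm => ih d (hgone d hdm) f' (by omega)
        simp only [hmap]

theorem pvStable' (tab : List PvE) (k : Nat) (s : String) (h : s ∉ pvKeys (pvP tab k)) :
    ∀ f g, k ≤ f → k ≤ g → totalF tab f s = totalF tab g s := by
  have base : ∀ m, totalF tab (k + m) s = totalF tab k s := by
    intro m
    induction m with
    | zero => rfl
    | succ i ih => rw [← Nat.add_assoc, pvStable tab k s h (k + i) (by omega), ih]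
  intro f g hf hg
  have h1 := base (f - k); have h2 := base (g - k)
  rw [Nat.add_sub_cancel' hf] at h1
  rw [Nat.add_sub_cancel' hg] at h2
  rw [h1, h2]

-- A's hand-rolled running maximum is the max fold
theorem pvFoldMax (l : List Int) : ∀ a : Int,
    l.foldl (fun m x => if x > m then x else m) a = l.foldl max a := by
  induction l with
  | nil => intro _; rfl
  | cons x xs ih =>
    intro a
    simp only [List.foldl_cons, ih]
    congr 1
    rcases le_or_gt x a with h | h
    · rw [if_neg (by omega), max_eq_left h]
    · rw [if_pos (by omega), max_eq_right (by omega)]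

-- unfolding equations for the well-founded pvCost/pvDeps
theorem pvCost_zero (idx : PySem.Dict String (String × List String)) (n : String)
    (memo : PySem.Dict String Int) : pvCost idx 0 n memo = (-1, memo) := by
  simp [pvCost]

theorem pvCost_succ_none (idx : PySem.Dict String (String × List String)) (f : Nat) (n : String)
    (memo : PySem.Dict String Int) (h : idx.get? n = none) :
    pvCost idx (f + 1) n memo = (-1, memo) := by
  simp [pvCost, h]

theorem pvCost_succ_memo (idx : PySem.Dict String (String × List String)) (f : Nat) (n : String)
    (memo : PySem.Dict String Int) (cd : String × List String) (v : Int)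
    (h : idx.get? n = some cd) (hm : memo.get? n = some v) :
    pvCost idx (f + 1) n memo = (v, memo) := by
  simp [pvCost, h, hm]

theorem pvCost_succ_leaf (idx : PySem.Dict String (String × List String)) (f : Nat) (n : String)
    (memo : PySem.Dict String Int) (cd : String × List String)
    (h : idx.get? n = some cd) (hm : memo.get? n = none) (hd : cd.2 = []) :
    pvCost idx (f + 1) n memo
      = ((PySem.Int.ofStr? cd.1).getD 0, memo.insert n ((PySem.Int.ofStr? cd.1).getD 0)) := by
  simp [pvCost, h, hm, hd]

theorem pvCost_succ_node (idx : PySem.Dict String (String × List String)) (f : Nat) (n : String)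
    (memo : PySem.Dict String Int) (cd : String × List String)
    (h : idx.get? n = some cd) (hm : memo.get? n = none) (hd : cd.2 ≠ []) :
    pvCost idx (f + 1) n memo
      = ((pvDeps idx f cd.2 (-1) memo).1 + (PySem.Int.ofStr? cd.1).getD 0,
         (pvDeps idx f cd.2 (-1) memo).2.insert n
           ((pvDeps idx f cd.2 (-1) memo).1 + (PySem.Int.ofStr? cd.1).getD 0)) := by
  simp [pvCost, h, hm, hd]

theorem pvDeps_nil (idx : PySem.Dict String (String × List String)) (fuel : Nat) (best : Int)
    (memo : PySem.Dict String Int) : pvDeps idx fuel [] best memo = (best, memo) := by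
  simp [pvDeps]

theorem pvDeps_cons (idx : PySem.Dict String (String × List String)) (fuel : Nat) (d : String)
    (ds : List String) (best : Int) (memo : PySem.Dict String Int) :
    pvDeps idx fuel (d :: ds) best memo
      = pvDeps idx fuel ds (max best (pvCost idx fuel d memo).1) (pvCost idx fuel d memo).2 := by
  simp [pvDeps]

-- the memo invariant: every stored value is the final A-value of its key
def pvInv (tab : List PvE) (memo : PySem.Dict String Int) : Prop :=
  ∀ k v, memo.get? k = some v → v = totalF tab tab.length k

-- the main B-side lemma: with a consistent memo and enough fuel, pvCost returns the
-- final A-value and keeps the memo consistent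
theorem pvCost_spec (tab : List PvE) :
    ∀ r, r ≤ tab.length → ∀ n, n ∉ pvKeys (pvP tab r) →
    ∀ fuel, r ≤ fuel → ∀ memo, pvInv tab memo →
      (pvCost (pvIdx tab) fuel n memo).1 = totalF tab tab.length n ∧
      pvInv tab (pvCost (pvIdx tab) fuel n memo).2 := by
  intro r
  induction r with
  | zero =>
    intro _ n h fuel _ memo hInv
    have hg : (pvIdx tab).get? n = none := (pvGet?_none_iff tab n).mpr h
    rw [totalF_none tab _ _ hg]
    cases fuel with
    | zero => rw [pvCost_zero]; exact ⟨rfl, hInv⟩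
    | succ f => rw [pvCost_succ_none _ _ _ _ hg]; exact ⟨rfl, hInv⟩
  | succ j ih =>
    intro hr n h fuel hfuel memo hInv
    obtain ⟨f, rfl⟩ : ∃ f, fuel = f + 1 := ⟨fuel - 1, by omega⟩
    cases hg : (pvIdx tab).get? n with
    | none =>
      rw [totalF_none tab _ _ hg, pvCost_succ_none _ _ _ _ hg]
      exact ⟨rfl, hInv⟩
    | some cd =>
      have he : (n, cd) ∈ pvP tab 0 := PySem.Dict.mem_items_of_get?_eq_some _ hg
      obtain ⟨hps, hgone⟩ := pvDep_gone tab j (n, cd) he h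
      have htabne : tab ≠ [] := by
        intro hnil
        rw [hnil] at he
        simp [pvP, pvIdx, PySem.Dict.empty] at he
      obtain ⟨n', hn⟩ : ∃ n', tab.length = n' + 1 :=
        ⟨tab.length - 1, by cases tab with | nil => exact absurd rfl htabne | cons a l => simp⟩
      cases hm : memo.get? n with
      | some v =>
        rw [pvCost_succ_memo _ _ _ _ _ _ hg hm]
        refine ⟨?_, hInv⟩
        exact hInv n v hm
      | none =>
        by_cases hd : cd.2 = []
        · rw [pvCost_succ_leaf _ _ _ _ _ hg hm hd]
          have hval : totalF tab tab.length n = (PySem.Int.ofStr? cd.1).getD 0 := by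
            rw [hn, totalF_succ_some tab n' n cd hg, if_pos hd]
          refine ⟨hval.symm, ?_⟩
          intro k v hk
          rw [PySem.Dict.get?_insert] at hk
          split_ifs at hk with hkn
          · subst hkn
            rw [hval]
            exact ((Option.some.injEq _ _).mp hk).symm
          · exact hInv k v hk
        · rw [pvCost_succ_node _ _ _ _ _ hg hm hd]
          -- the deps loop: fold keeps the invariant and computes the running max of final values
          have hfold : ∀ ds, (∀ d ∈ ds, d ∉ pvKeys (pvP tab j)) →
              ∀ best mm, pvInv tab mm →
              (pvDeps (pvIdx tab) f ds best mm).1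
                = (ds.map (totalF tab tab.length)).foldl max best ∧
              pvInv tab (pvDeps (pvIdx tab) f ds best mm).2 := by
            intro ds
            induction ds with
            | nil => intro _ best mm hmm; rw [pvDeps_nil]; exact ⟨rfl, hmm⟩
            | cons d ds ihd =>
              intro hds best mm hmm
              have hcall := ih (by omega) d (hds d (by simp)) f (by omega) mm hmm
              rw [pvDeps_cons]
              have hrest := ihd (fun d' hd' => hds d' (by simp [hd']))
                (max best (pvCost (pvIdx tab) f d mm).1) (pvCost (pvIdx tab) f d mm).2 hcall.2
              refine ⟨?_, hrest.2⟩
              rw [hrest.1, hcall.1]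
              simp [List.foldl_cons]
          have hf := hfold cd.2 hgone (-1) memo hInv
          have hval : totalF tab tab.length n
              = (cd.2.map (totalF tab tab.length)).foldl max (-1) + (PySem.Int.ofStr? cd.1).getD 0 := by
            rw [hn, totalF_succ_some tab n' n cd hg, if_neg hd, pvFoldMax]
            congr 1
            congr 1
            exact List.map_congr_left fun d hdm =>
              pvStable' tab j d (hgone d hdm) n' (n' + 1) (by omega) (by omega)
          refine ⟨by rw [hf.1, ← hval], ?_⟩
          intro k v hk
          rw [PySem.Dict.get?_insert] at hk
          split_ifs at hk with hkn
          · subst hkn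
            rw [hval, ← hf.1]
            exact ((Option.some.injEq _ _).mp hk).symm
          · exact hf.2 k v hk

-- ===== VERDICT (by name: the statement is the Claim_ definition above) =====
theorem total_spec : Claim_equal_total := by
  intro name tab _ hpre
  unfold Spec_total total total_alt
  have hpre' : name ∉ pvKeys (pvP tab tab.length) := hpre
  have hInv0 : pvInv tab PySem.Dict.empty := by
    intro k v hk
    rw [PySem.Dict.get?_empty] at hk
    exact absurd hk (by simp)
  have := pvCost_spec tab tab.length le_rfl name hpre' (tab.length + 1) (by omega)
    PySem.Dict.empty hInv0
  rw [this.1]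
  exact pvStable' tab tab.length name hpre' (tab.length + 1) tab.length (by omega) (by omega)
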